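-- pv_equiv track=rewrite | github.com/jjaehong/TIL | TIL/python/python_problem/problem11.py | get_row_col_maxsum
-- ===== SOURCE A (Python) =====
-- def get_row_col_maxsum(matrix):
--     pass
--     # 여기에 코드를 작성하여 함수를 완성합니다.
--     row_len = 0  # 행 길이
--     col_len = 0  # 열 길이
--
--     # 행 ==> 리스트 안에 리스트가 몇개?
--     for r in matrix:
--         row_len += 1
--     # 열 ==> 리스트 안에 리스트가 있는데 그 리스트의 원소 갯수가 몇개?
--     for c in matrix[0]:
--         col_len += 1
--
--     # 지금까지 내가 알고 있던 최대 합
--     total_max = 0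
--     # 행 or 열
--     res = ""
--
--     # 가로 합
--     # 행 인덱스 먼저 고정 => 열 인덱스 반복
--     # 행 0 => 열 0,1,2,3,4,...,c-1
--     # 행 1 => 열 0,1,2,3,4,...,c-1
--     # ...
--     # 행 r-1 => 열 0,1,2,3,4,...,c-1
--     for r_i in range(row_len):
--         # 새로 구한 합
--         total = 0
--         # r_i 번째 리스트의 합 구하기
--         for c_i in range(col_len):
--             total += matrix[r_i][c_i]
--
--         # 큰 값인지 확인
--         # 내가 지금까지 알고 있던 합보다 새로 구한 합이 더 크다면
--         if total_max < total:
--             # 갱신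
--             total_max = total
--             res = "row"  # 가로가 크다고 일단 생각
--
--     # 세로 합
--     # 열 인덱스 먼저 고정 => 행 인덱스 반복
--     # 열 0 => 행 0,1,2,3,4,...,c-1
--     # 열 1 => 행 0,1,2,3,4,...,c-1
--     # ..
--     # 열 r-1 => 행 0,1,2,3,4,...,c-1
--     for c_i in range(col_len):
--         # 새로 구한 합
--         total = 0
--         # 모든 리스트의 c_i 번째 원소들의 합
--         for r_i in range(row_len):
--             total += matrix[r_i][c_i]
--
--         # 큰 값인지 확인
--         if total_max < total:
--             # 갱신
--             total_max = total
--             res = "col"  # 세로가 크다.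
--
--     return res, total_max
-- ===== SOURCE B (Python) =====
-- def get_row_col_maxsum(matrix):
--     width = len(matrix[0])
--     colsums = [0] * width
--     best_row = 0
--     for row in matrix:
--         s = 0
--         for c in range(width):
--             v = row[c]
--             s += v
--             colsums[c] += v
--         if best_row < s:
--             best_row = s
--     res, best = ("row", best_row) if 0 < best_row else ("", 0)
--     for s in colsums:
--         if best < s:
--             res, best = "col", s
--     return res, best
-- ===== Notes on version B (the rewrite author's own statement) =====
-- stated objective: alternative
-- what changed: B makes a single fused pass over the matrix, maintaining a mutable column-sum accumulator vector and the running best row sum simultaneously (each cell is read once), then decides over the accumulated vector; A makes two separate full matrix traversals (row scan, then column scan re-reading every cell).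
import Mathlib
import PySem

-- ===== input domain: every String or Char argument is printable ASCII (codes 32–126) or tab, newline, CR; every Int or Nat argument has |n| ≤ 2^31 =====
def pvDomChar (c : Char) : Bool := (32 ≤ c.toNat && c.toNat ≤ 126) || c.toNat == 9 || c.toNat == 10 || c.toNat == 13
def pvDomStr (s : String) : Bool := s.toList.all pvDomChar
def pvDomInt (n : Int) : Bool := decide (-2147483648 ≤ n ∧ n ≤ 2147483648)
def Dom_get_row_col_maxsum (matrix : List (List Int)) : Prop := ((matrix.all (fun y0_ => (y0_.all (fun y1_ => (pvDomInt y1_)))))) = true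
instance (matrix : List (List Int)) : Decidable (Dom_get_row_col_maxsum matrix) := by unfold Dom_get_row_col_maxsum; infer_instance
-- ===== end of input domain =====

-- B makes one fused pass over the matrix, carrying a column-sum accumulator vector and the
-- running best row sum together, instead of A's two separate full traversals (objective: alternative).

-- ===== PORT A =====
-- literal transliteration of A: counting loops for the lengths, then two
-- index-driven scans each keeping the running (res, total_max) state.
-- matrix[r][c] is ported with PySem.List.pyGetD (default unreachable under Pre_).
def get_row_col_maxsum (matrix : List (List Int)) : String × Int :=
  let row_len : Int := matrix.foldl (fun a _ => a + 1) 0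
  let row0 : List Int := (PySem.List.pyGet? matrix 0).getD []   -- matrix[0]; none (IndexError) excluded by Pre_
  let col_len : Int := row0.foldl (fun a _ => a + 1) 0
  let st1 :=
    (PySem.List.pyRange 0 row_len).foldl (fun (st : String × Int) r_i =>
      let total := (PySem.List.pyRange 0 col_len).foldl
        (fun t c_i => t + PySem.List.pyGetD (PySem.List.pyGetD matrix r_i []) c_i 0) 0
      if st.2 < total then ("row", total) else st) ("", 0)
  (PySem.List.pyRange 0 col_len).foldl (fun (st : String × Int) c_i =>
      let total := (PySem.List.pyRange 0 row_len).foldl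
        (fun t r_i => t + PySem.List.pyGetD (PySem.List.pyGetD matrix r_i []) c_i 0) 0
      if st.2 < total then ("col", total) else st) st1

-- ===== PORT B =====
-- literal transliteration of B: one pass over the rows with state (best_row, colsums);
-- the inner loop accumulates the row sum s and updates colsums[c] in place
-- (list mutation ported with PySem.List.pySetD); then the scan over colsums.
def get_row_col_maxsum_alt (matrix : List (List Int)) : String × Int :=
  let width : Int := (((PySem.List.pyGet? matrix 0).getD []).length : Int)
  let st : Int × List Int :=
    matrix.foldl (fun (st : Int × List Int) row =>
      let p := (PySem.List.pyRange 0 width).foldl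
        (fun (p : Int × List Int) c =>
          (p.1 + PySem.List.pyGetD row c 0,
           PySem.List.pySetD p.2 c (PySem.List.pyGetD p.2 c 0 + PySem.List.pyGetD row c 0)))
        (0, st.2)
      (if st.1 < p.1 then p.1 else st.1, p.2))
      (0, List.replicate width.toNat 0)
  let st1 : String × Int := if 0 < st.1 then ("row", st.1) else ("", 0)
  st.2.foldl (fun (st : String × Int) s => if st.2 < s then ("col", s) else st) st1

-- ===== PRECONDITION & SPEC =====
-- Pre_ excludes exactly the inputs where the Python A raises IndexError:
-- the empty matrix (matrix[0]) and matrices whose some row is shorter than row 0.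
def Pre_get_row_col_maxsum (matrix : List (List Int)) : Prop :=
  matrix ≠ [] ∧ ∀ row ∈ matrix, (matrix.headI).length ≤ row.length
instance (matrix : List (List Int)) : Decidable (Pre_get_row_col_maxsum matrix) := by
  unfold Pre_get_row_col_maxsum; infer_instance
def pvWitness_get_row_col_maxsum : List (List Int) := [[1, 2], [3, 4]]

def Spec_get_row_col_maxsum (matrix : List (List Int)) (out : String × Int) : Prop := out = get_row_col_maxsum_alt matrix
instance (matrix : List (List Int)) (out : String × Int) : Decidable (Spec_get_row_col_maxsum matrix out) := by unfold Spec_get_row_col_maxsum; infer_instance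

-- ===== CLAIM (what is proved, stated in full; the proofs are below) =====
def Claim_equal_get_row_col_maxsum : Prop := ∀ (matrix : List (List Int)), Dom_get_row_col_maxsum matrix → Pre_get_row_col_maxsum matrix → Spec_get_row_col_maxsum matrix (get_row_col_maxsum matrix)

-- ===== LEMMAS AND PROOFS =====

-- counting loop 'for x in l: n += 1'
lemma pv_count_foldl {α : Type} : ∀ (l : List α) (a : Int),
    l.foldl (fun x _ => x + 1) a = a + l.length := by
  intro l
  induction l with
  | nil => intro a; simp
  | cons x xs ih => intro a; simp [List.foldl_cons, ih (a + 1)]; ring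

-- A's running-maximum scan equals "take the max, tag if it improved"
lemma pv_scan_eq {α : Type} (tag : String) (v : α → Int) : ∀ (l : List α) (st : String × Int),
    l.foldl (fun st x => if st.2 < v x then (tag, v x) else st) st
      = if st.2 < (l.map v).foldl max st.2 then (tag, (l.map v).foldl max st.2) else st := by
  intro l
  induction l with
  | nil => intro st; simp
  | cons x xs ih =>
    intro st
    simp only [List.foldl_cons, List.map_cons]
    by_cases h : st.2 < v x
    · rw [if_pos h, ih, max_eq_right (le_of_lt h)]
      have hle : v x ≤ (xs.map v).foldl max (v x) := (PySem.List.le_foldl_max (xs.map v) (v x)).1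
      have hst : st.2 < (xs.map v).foldl max (v x) := lt_of_lt_of_le h hle
      by_cases h2 : v x < (xs.map v).foldl max (v x)
      · simp [h2, hst]
      · have : (xs.map v).foldl max (v x) = v x := le_antisymm (not_lt.1 h2) hle
        simp [this, h]
    · rw [if_neg h, ih, max_eq_left (not_lt.1 h)]

lemma pv_getD_set (xs : List Int) (n : Nat) (v : Int) (j : Nat) :
    (xs.set n v).getD j 0 = if j = n ∧ j < xs.length then v else xs.getD j 0 := by
  simp only [List.getD, List.getElem?_set]
  by_cases he : n = j
  · subst he
    by_cases hl : n < xs.length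
    · simp [hl]
    · simp [hl]
  · simp [he, Ne.symm he]

lemma pv_range_split (m : Nat) : PySem.List.pyRange 0 ((m : Int) + 1)
    = PySem.List.pyRange 0 (m : Int) ++ [(m : Int)] :=
  PySem.List.pyRange_one_succ_right (Int.natCast_nonneg m)

lemma pv_updF_length (row : List Int) : ∀ (m : Nat) (cs : List Int),
    ((PySem.List.pyRange 0 (m : Int)).foldl
      (fun cs c => PySem.List.pySetD cs c (PySem.List.pyGetD cs c 0 + PySem.List.pyGetD row c 0)) cs).length
      = cs.length := by
  intro m
  induction m with
  | zero => intro cs; simp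
  | succ m ih =>
    intro cs
    rw [show ((m + 1 : Nat) : Int) = (m : Int) + 1 by push_cast; ring, pv_range_split,
      List.foldl_append]
    simp [ih cs, PySem.List.pySetD_natCast]

lemma pv_updF_getD (row : List Int) : ∀ (m : Nat) (cs : List Int) (j : Nat),
    ((PySem.List.pyRange 0 (m : Int)).foldl
      (fun cs c => PySem.List.pySetD cs c (PySem.List.pyGetD cs c 0 + PySem.List.pyGetD row c 0)) cs).getD j 0
      = if j < m ∧ j < cs.length then cs.getD j 0 + row.getD j 0 else cs.getD j 0 := by
  intro m
  induction m with
  | zero => intro cs j; simp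
  | succ m ih =>
    intro cs j
    rw [show ((m + 1 : Nat) : Int) = (m : Int) + 1 by push_cast; ring, pv_range_split,
      List.foldl_append]
    simp only [List.foldl_cons, List.foldl_nil, PySem.List.pySetD_natCast,
      PySem.List.pyGetD_natCast]
    rw [pv_getD_set, pv_updF_length row m cs, ih cs m, ih cs j]
    split_ifs <;> first | rfl | omega | (simp_all)

lemma pv_colfold_length (m : Nat) : ∀ (rows : List (List Int)) (cs : List Int),
    ((rows.foldl (fun cs row =>
        (PySem.List.pyRange 0 (m : Int)).foldl
          (fun cs c => PySem.List.pySetD cs c (PySem.List.pyGetD cs c 0 + PySem.List.pyGetD row c 0)) cs)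
        cs).length) = cs.length := by
  intro rows
  induction rows with
  | nil => intro cs; rfl
  | cons row rows ih => intro cs; rw [List.foldl_cons, ih, pv_updF_length]

lemma pv_colfold_getD (m : Nat) : ∀ (rows : List (List Int)) (cs : List Int),
    cs.length = m → ∀ (j : Nat), j < m →
    ((rows.foldl (fun cs row =>
        (PySem.List.pyRange 0 (m : Int)).foldl
          (fun cs c => PySem.List.pySetD cs c (PySem.List.pyGetD cs c 0 + PySem.List.pyGetD row c 0)) cs)
        cs).getD j 0)
      = cs.getD j 0 + (rows.map (fun row => row.getD j 0)).sum := by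
  intro rows
  induction rows with
  | nil => intro cs _ j _; simp
  | cons row rows ih =>
    intro cs hcs j hj
    simp only [List.foldl_cons, List.map_cons, List.sum_cons]
    rw [ih _ (by rw [pv_updF_length]; exact hcs) j hj, pv_updF_getD]
    rw [if_pos ⟨hj, by omega⟩]
    ring


-- ===== VERDICT (by name: the statement is the Claim_ definition above) =====
theorem get_row_col_maxsum_spec : Claim_equal_get_row_col_maxsum := by
  intro matrix _ _
  unfold Spec_get_row_col_maxsum get_row_col_maxsum get_row_col_maxsum_alt
  simp only [pv_count_foldl, zero_add]
  set n : Nat := ((PySem.List.pyGet? matrix 0).getD []).length with hn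
  -- shared abbreviations: the row sum S, the column-update step U, the column sum
  set S : List Int → Int := fun row =>
    (PySem.List.pyRange 0 (n : Int)).foldl (fun t c => t + PySem.List.pyGetD row c 0) 0 with hS
  set U : List Int → List Int → List Int := fun cs row =>
    (PySem.List.pyRange 0 (n : Int)).foldl
      (fun cs c => PySem.List.pySetD cs c (PySem.List.pyGetD cs c 0 + PySem.List.pyGetD row c 0)) cs with hU
  set colsum : Int → Int := fun c =>
    matrix.foldl (fun t row => t + PySem.List.pyGetD row c 0) 0 with hcolsum
  -- A side: index loops over range(len(matrix)) become folds over the rows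
  have hcol : ∀ c : Int,
      (PySem.List.pyRange 0 (matrix.length : Int)).foldl
        (fun t r_i => t + PySem.List.pyGetD (PySem.List.pyGetD matrix r_i []) c 0) 0
      = colsum c := fun c =>
    PySem.List.foldl_pyRange_zero_pyGetD' matrix [] (fun t row => t + PySem.List.pyGetD row c 0) 0
  have hrow :
      (PySem.List.pyRange 0 (matrix.length : Int)).foldl
        (fun (st : String × Int) r_i =>
          if st.2 < (PySem.List.pyRange 0 (n : Int)).foldl
              (fun t c_i => t + PySem.List.pyGetD (PySem.List.pyGetD matrix r_i []) c_i 0) 0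
          then ("row", (PySem.List.pyRange 0 (n : Int)).foldl
              (fun t c_i => t + PySem.List.pyGetD (PySem.List.pyGetD matrix r_i []) c_i 0) 0)
          else st) ("", 0)
      = matrix.foldl (fun (st : String × Int) row =>
          if st.2 < S row then ("row", S row) else st) ("", 0) :=
    PySem.List.foldl_pyRange_zero_pyGetD' matrix []
      (fun (st : String × Int) row => if st.2 < S row then ("row", S row) else st) ("", 0)
  -- B side: the fused loop is two independent accumulators (inner and outer)
  have hB : matrix.foldl (fun (st : Int × List Int) row =>
        (if st.1 < (List.foldl (fun (p : Int × List Int) c =>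
              (p.1 + PySem.List.pyGetD row c 0,
               PySem.List.pySetD p.2 c (PySem.List.pyGetD p.2 c 0 + PySem.List.pyGetD row c 0)))
            (0, st.2) (PySem.List.pyRange 0 (n : Int))).1
         then (List.foldl (fun (p : Int × List Int) c =>
              (p.1 + PySem.List.pyGetD row c 0,
               PySem.List.pySetD p.2 c (PySem.List.pyGetD p.2 c 0 + PySem.List.pyGetD row c 0)))
            (0, st.2) (PySem.List.pyRange 0 (n : Int))).1 else st.1,
         (List.foldl (fun (p : Int × List Int) c =>
              (p.1 + PySem.List.pyGetD row c 0,
               PySem.List.pySetD p.2 c (PySem.List.pyGetD p.2 c 0 + PySem.List.pyGetD row c 0)))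
            (0, st.2) (PySem.List.pyRange 0 (n : Int))).2))
      (0, List.replicate ((n : Int)).toNat 0)
      = (matrix.foldl (fun b row => if b < S row then S row else b) 0,
         matrix.foldl (fun cs row => U cs row) (List.replicate ((n : Int)).toNat 0)) := by
    have hstep : (fun (st : Int × List Int) row =>
        (if st.1 < (List.foldl (fun (p : Int × List Int) c =>
              (p.1 + PySem.List.pyGetD row c 0,
               PySem.List.pySetD p.2 c (PySem.List.pyGetD p.2 c 0 + PySem.List.pyGetD row c 0)))
            (0, st.2) (PySem.List.pyRange 0 (n : Int))).1
         then (List.foldl (fun (p : Int × List Int) c =>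
              (p.1 + PySem.List.pyGetD row c 0,
               PySem.List.pySetD p.2 c (PySem.List.pyGetD p.2 c 0 + PySem.List.pyGetD row c 0)))
            (0, st.2) (PySem.List.pyRange 0 (n : Int))).1 else st.1,
         (List.foldl (fun (p : Int × List Int) c =>
              (p.1 + PySem.List.pyGetD row c 0,
               PySem.List.pySetD p.2 c (PySem.List.pyGetD p.2 c 0 + PySem.List.pyGetD row c 0)))
            (0, st.2) (PySem.List.pyRange 0 (n : Int))).2))
        = fun (st : Int × List Int) row =>
            ((fun b r => if b < S r then S r else b) st.1 row, (fun cs r => U cs r) st.2 row) := by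
      funext st row
      rw [PySem.List.foldl_prod_mk (f := fun a c => a + PySem.List.pyGetD row c 0)
        (g := fun b c => PySem.List.pySetD b c (PySem.List.pyGetD b c 0 + PySem.List.pyGetD row c 0))]
    rw [hstep]
    exact PySem.List.foldl_prod_mk (fun b r => if b < S r then S r else b)
      (fun cs r => U cs r) matrix (0 : Int) (List.replicate ((n : Int)).toNat 0)
  rw [hB]
  simp only [hcol]
  rw [hrow, pv_scan_eq "row" S matrix ("", 0)]
  -- the running best row sum is the max of the row sums
  have hbest : matrix.foldl (fun (x : Int) y => max x (S y)) 0
      = matrix.foldl (fun b row => if b < S row then S row else b) 0 := by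
    apply PySem.List.foldl_congr_mem
    intro acc row _
    by_cases h : acc < S row
    · simp [h, max_eq_right h.le]
    · simp [h, max_eq_left (not_lt.1 h)]
  have h02 : (("", 0) : String × Int).2 = 0 := rfl
  -- the accumulated vector is exactly the list of column sums
  have hlen1 : (matrix.foldl (fun cs row => U cs row) (List.replicate ((n : Int)).toNat 0)).length
      = n := by
    rw [hU]
    rw [pv_colfold_length n matrix]
    simp
  have hcs : matrix.foldl (fun cs row => U cs row) (List.replicate ((n : Int)).toNat 0)
      = (PySem.List.pyRange 0 (n : Int)).map colsum := by
    apply List.ext_getElem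
    · rw [hlen1, List.length_map, PySem.List.length_pyRange_one]
      omega
    · intro j hj hj2
      have hjn : j < n := by rw [hlen1] at hj; exact hj
      have hgetD : ∀ (xs : List Int) (h : j < xs.length), xs[j] = xs.getD j 0 :=
        fun xs h => (List.getD_eq_getElem xs 0 h).symm
      rw [hgetD _ hj, hgetD _ hj2]
      rw [hU]
      rw [pv_colfold_getD n matrix (List.replicate ((n : Int)).toNat 0) (by simp) j hjn]
      have hr : ((PySem.List.pyRange 0 (n : Int)).map colsum).getD j 0 = colsum (j : Int) := by
        have := PySem.List.pyGetD_map_pyRange colsum n j 0 hjn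
        simpa using this
      rw [hr]
      simp only [hcolsum]
      rw [PySem.List.foldl_add (g := fun row => PySem.List.pyGetD row (j : Int) 0)]
      simp
  rw [hcs, List.foldl_map, List.foldl_map, h02, hbest]
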